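-- pv_equiv track=rewrite | github.com/nster98/PicrossGame | gamePicross/PicrossTools.py | getHintsVertical
-- ===== SOURCE A (Python) =====
-- def getHintsVertical(board, i):
--
--     hintsArr = []
--     count = 0
--
--     for j in range(len(board[i])):
--         if (board[j][i] != -1):
--             count += 1
--         elif (count != 0):
--             hintsArr.append(count)
--             count = 0
--
--     if (count != 0):
--         hintsArr.append(count)
--
--     return hintsArr
-- ===== SOURCE B (Python) =====
-- def getHintsVertical(board, i):
--     # Column of filled-flags, built with the same board[j][i] indexing as the original.
--     col = [board[j][i] != -1 for j in range(len(board[i]))]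
--     # Two-pointer run scan: jump from run boundary to run boundary.
--     hints = []
--     j, n = 0, len(col)
--     while j < n:
--         if col[j]:
--             k = j + 1
--             while k < n and col[k]:
--                 k += 1
--             hints.append(k - j)
--             j = k
--         else:
--             j += 1
--     return hints
-- ===== Notes on version B (the rewrite author's own statement) =====
-- stated objective: alternative
-- what changed: Replaces the stateful counter-with-final-flush loop by building the column's filled-flags once and scanning it with a two-pointer run finder (jump to the end of each maximal run and emit its length).
import Mathlib
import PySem

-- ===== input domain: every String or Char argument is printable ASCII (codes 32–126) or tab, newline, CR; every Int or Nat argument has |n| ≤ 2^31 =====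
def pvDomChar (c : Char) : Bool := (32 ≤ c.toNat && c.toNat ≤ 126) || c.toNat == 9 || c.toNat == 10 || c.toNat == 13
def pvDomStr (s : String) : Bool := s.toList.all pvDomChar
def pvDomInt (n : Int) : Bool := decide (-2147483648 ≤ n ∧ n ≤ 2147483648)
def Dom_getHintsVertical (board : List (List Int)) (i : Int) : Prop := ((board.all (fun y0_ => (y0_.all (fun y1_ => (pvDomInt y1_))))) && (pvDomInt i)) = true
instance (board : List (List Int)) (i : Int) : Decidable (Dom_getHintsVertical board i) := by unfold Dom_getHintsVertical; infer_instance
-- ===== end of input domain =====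

-- ===== PORT A =====
-- B changes the decomposition only: a filled-flag column plus a two-pointer run scan,
-- instead of A's running counter with a final flush. Same cost; no speed claim.
def getHintsVertical (board : List (List Int)) (i : Int) : List Int :=
  match PySem.List.pyGet? board i with
  | none => []  -- unreachable under Pre_ (Python raises IndexError on board[i])
  | some row =>
    let st := (List.range row.length).foldl (fun (st : List Int × Int) (j : Nat) =>
      match (PySem.List.pyGet? board (j : Int)).bind (fun r => PySem.List.pyGet? r i) with
      | none => st  -- unreachable under Pre_ (Python raises IndexError on board[j][i])
      | some v =>
        if v ≠ -1 then (st.1, st.2 + 1)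
        else if st.2 ≠ 0 then (st.1 ++ [st.2], 0)
        else st) ([], 0)
    if st.2 ≠ 0 then st.1 ++ [st.2] else st.1

-- ===== PORT B =====
-- the while loops of Source B's two-pointer scan, as structural recursion on the suffix col[j:]:
-- the inner while advances k over the run (takeWhile), appends k - j, and resumes at col[k:] (dropWhile)
def pvRuns (col : List Bool) : List Int :=
  match col with
  | [] => []
  | b :: rest =>
    if b then (((rest.takeWhile id).length : Int) + 1) :: pvRuns (rest.dropWhile id)
    else pvRuns rest
termination_by col.length
decreasing_by
  · have := List.length_dropWhile_le (p := id) (l := rest); simp; omega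
  · simp

def getHintsVertical_alt (board : List (List Int)) (i : Int) : List Int :=
  match PySem.List.pyGet? board i with
  | none => []  -- unreachable under Pre_
  | some row =>
    let col : List Bool := (List.range row.length).map (fun (j : Nat) =>
      match (PySem.List.pyGet? board (j : Int)).bind (fun r => PySem.List.pyGet? r i) with
      | none => false  -- unreachable under Pre_
      | some v => decide (v ≠ -1))
    pvRuns col

-- ===== PRECONDITION & SPEC =====
-- Pre_ excludes exactly the inputs where A raises IndexError: board[i] must exist,
-- and board[j][i] must exist for every j in range(len(board[i])).
def Pre_getHintsVertical (board : List (List Int)) (i : Int) : Prop :=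
  (PySem.List.pyGet? board i).isSome = true ∧
  ∀ j ∈ List.range ((PySem.List.pyGet? board i).getD []).length,
    ((PySem.List.pyGet? board (j : Int)).bind (fun r => PySem.List.pyGet? r i)).isSome = true
instance (board : List (List Int)) (i : Int) : Decidable (Pre_getHintsVertical board i) := by
  unfold Pre_getHintsVertical; infer_instance

def pvWitness_getHintsVertical : List (List Int) × Int := ([[0, -1], [2, 3]], 0)

def Spec_getHintsVertical (board : List (List Int)) (i : Int) (out : List Int) : Prop := out = getHintsVertical_alt board i
instance (board : List (List Int)) (i : Int) (out : List Int) : Decidable (Spec_getHintsVertical board i out) := by unfold Spec_getHintsVertical; infer_instance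

-- ===== CLAIM (what is proved, stated in full; the proofs are below) =====
def Claim_equal_getHintsVertical : Prop := ∀ (board : List (List Int)) (i : Int), Dom_getHintsVertical board i → Pre_getHintsVertical board i → Spec_getHintsVertical board i (getHintsVertical board i)

-- ===== LEMMAS AND PROOFS =====

-- A's loop body and flush, over the already-looked-up optional cells
def pvStep (st : List Int × Int) (o : Option Int) : List Int × Int :=
  match o with
  | none => st
  | some v =>
    if v ≠ -1 then (st.1, st.2 + 1)
    else if st.2 ≠ 0 then (st.1 ++ [st.2], 0)
    else st

def pvToB (o : Option Int) : Bool :=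
  match o with
  | none => false
  | some v => decide (v ≠ -1)

-- the invariant linking A's counter state to B's run decomposition
theorem pv_inv (l : List (Option Int)) : ∀ (hints : List Int) (c : Int), 0 ≤ c →
    (∀ o ∈ l, o.isSome = true) →
    (let st := l.foldl pvStep (hints, c)
     if st.2 ≠ 0 then st.1 ++ [st.2] else st.1) =
      hints ++ (if c = 0 then pvRuns (l.map pvToB)
        else (c + (((l.map pvToB).takeWhile id).length : Int)) :: pvRuns ((l.map pvToB).dropWhile id)) := by
  induction l with
  | nil =>
    intro hints c hc _
    simp [pvRuns]
    by_cases h : c = 0 <;> simp [h]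
  | cons o rest ih =>
    intro hints c hc hall
    obtain ⟨v, rfl⟩ := Option.isSome_iff_exists.mp (hall o (by simp))
    have hrest : ∀ o ∈ rest, o.isSome = true := fun o ho => hall o (by simp [ho])
    by_cases hv : v = -1
    · -- separator cell
      by_cases h0 : c = 0
      · simp [pvStep, pvToB, hv, h0, ih hints 0 le_rfl hrest, pvRuns]
      · have := ih (hints ++ [c]) 0 le_rfl hrest
        simp [pvStep, pvToB, hv, h0, this, pvRuns]
    · -- filled cell: counter grows by one, run head grows by one
      have hc1 : ¬ (c + 1 = 0) := by omega
      have := ih hints (c + 1) (by omega) hrest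
      by_cases h0 : c = 0
      · subst h0
        simp only [zero_add] at this
        simp [pvStep, pvToB, hv, this, pvRuns]
        omega
      · simp [pvStep, pvToB, hv, h0, this, hc1]
        omega

theorem pv_main (board : List (List Int)) (i : Int)
    (hpre : Pre_getHintsVertical board i) :
    Spec_getHintsVertical board i (getHintsVertical board i) := by
  obtain ⟨hsome, hall⟩ := hpre
  obtain ⟨row, hrow⟩ := Option.isSome_iff_exists.mp hsome
  unfold Spec_getHintsVertical getHintsVertical getHintsVertical_alt
  rw [hrow] at hall ⊢
  dsimp only
  simp only [Option.getD_some] at hall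
  set lk : Nat → Option Int :=
    fun j => (PySem.List.pyGet? board (j : Int)).bind (fun r => PySem.List.pyGet? r i) with hlk
  have hfold : (List.range row.length).foldl (fun (st : List Int × Int) j =>
      match lk j with
      | none => st
      | some v =>
        if v ≠ -1 then (st.1, st.2 + 1)
        else if st.2 ≠ 0 then (st.1 ++ [st.2], 0)
        else st) ([], 0) = ((List.range row.length).map lk).foldl pvStep ([], 0) := by
    rw [List.foldl_map]
    rfl
  have hcol : ((List.range row.length).map (fun j =>
      match lk j with
      | none => false
      | some v => decide (v ≠ -1))) = ((List.range row.length).map lk).map pvToB := by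
    rw [List.map_map]; rfl
  have hsomes : ∀ o ∈ (List.range row.length).map lk, o.isSome = true := by
    intro o ho
    obtain ⟨j, hj, rfl⟩ := List.mem_map.mp ho
    exact hall j hj
  have key := pv_inv ((List.range row.length).map lk) [] 0 le_rfl hsomes
  simp only [List.nil_append, reduceIte] at key
  rw [hfold, hcol]
  exact key

-- ===== VERDICT (by name: the statement is the Claim_ definition above) =====
theorem getHintsVertical_spec : Claim_equal_getHintsVertical := by
  intro board i _ hpre
  exact pv_main board i hpre
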